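-- pv_equiv track=rewrite | github.com/Djwarf/babelvox | src/babelvox/epub.py | parse_chapter_range
-- ===== SOURCE A (Python) =====
-- def parse_chapter_range(spec: str, total: int) -> list[int]:
--     """Parse a chapter range spec like '1-5' or '3' or '1,3,5-7'.
--
--     Returns zero-based indices.
--     """
--     indices = set()
--     for part in spec.split(","):
--         part = part.strip()
--         if "-" in part:
--             start, end = part.split("-", 1)
--             start = max(1, int(start))
--             end = min(total, int(end))
--             indices.update(range(start - 1, end))
--         else:
--             idx = int(part) - 1
--             if 0 <= idx < total:
--                 indices.add(idx)
--     return sorted(indices)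
-- ===== SOURCE B (Python) =====
-- def parse_chapter_range(spec: str, total: int) -> list[int]:
--     """Parse a chapter range spec like '1-5' or '3' or '1,3,5-7'.
--
--     Returns zero-based indices.
--     """
--     # Stage 1: parse each part into a clamped half-open interval [lo, hi).
--     intervals = []
--     for part in spec.split(","):
--         part = part.strip()
--         if "-" in part:
--             a, b = part.split("-", 1)
--             lo = max(1, int(a)) - 1
--             hi = min(total, int(b))
--         else:
--             lo = int(part) - 1
--             hi = lo + 1 if 0 <= lo < total else lo
--         if lo < hi:
--             intervals.append((lo, hi))
--     # Stage 2: sweep the intervals in order of start, emitting each index once.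
--     intervals.sort(key=lambda iv: iv[0])
--     out = []
--     cur = 0
--     for lo, hi in intervals:
--         out.extend(range(max(lo, cur), hi))
--         cur = max(cur, hi)
--     return out
-- ===== Notes on version B (the rewrite author's own statement) =====
-- stated objective: alternative
-- what changed: B is an interval-sweep: it parses each part into a clamped half-open interval, sorts the (few) intervals by start, and emits indices once in one cursor-driven sweep, instead of A's expansion of every range into a set of individual indices followed by sorting that set.
import Mathlib
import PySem

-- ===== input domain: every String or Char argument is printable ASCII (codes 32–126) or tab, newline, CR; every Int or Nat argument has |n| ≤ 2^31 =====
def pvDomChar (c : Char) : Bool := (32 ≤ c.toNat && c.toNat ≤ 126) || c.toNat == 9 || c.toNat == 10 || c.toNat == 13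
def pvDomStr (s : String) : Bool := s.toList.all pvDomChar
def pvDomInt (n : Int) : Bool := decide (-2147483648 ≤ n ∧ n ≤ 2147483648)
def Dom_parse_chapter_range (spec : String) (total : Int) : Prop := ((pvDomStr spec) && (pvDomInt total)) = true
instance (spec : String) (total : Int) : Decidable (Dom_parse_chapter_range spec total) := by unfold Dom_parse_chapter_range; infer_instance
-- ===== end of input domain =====

-- B replaces A's expand-into-a-set-then-sort by an interval sweep: each part becomes a clamped
-- half-open interval, the intervals are sorted by start, and the indices are emitted once by a
-- cursor-driven in-order sweep (objective: alternative).

-- ===== PORT A =====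
-- one comma-separated part of A's loop body; none = Python ValueError from int()
def pcrPartA (total : Int) (s : PySem.Set Int) (part : String) : Option (PySem.Set Int) :=
  let q := PySem.Str.strip part
  if PySem.Str.isIn "-" q then
    match PySem.Str.splitMax? q "-" 1 with
    | some [s1, s2] =>
      match PySem.Int.ofStr? s1, PySem.Int.ofStr? s2 with
      | some v1, some v2 =>
        let start := max 1 v1
        let stop := min total v2
        some (PySem.Set.update s (PySem.List.pyRange (start - 1) stop))
      | _, _ => none
    | _ => none
  else
    match PySem.Int.ofStr? q with
    | some v =>
      let idx := v - 1
      if 0 ≤ idx ∧ idx < total then some (PySem.Set.add s idx) else some s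
    | none => none

def pcrLoopA (total : Int) (parts : List String) (s : PySem.Set Int) : Option (PySem.Set Int) :=
  match parts with
  | [] => some s
  | p :: rest =>
    match pcrPartA total s p with
    | some s' => pcrLoopA total rest s'
    | none => none

def parse_chapter_range (spec : String) (total : Int) : List Int :=
  match pcrLoopA total ((PySem.Str.split? spec ",").getD []) PySem.Set.empty with
  | some s => PySem.List.sorted s (fun x => x)
  | none => []   -- Python raises ValueError here; excluded by Pre_

-- ===== PORT B =====
-- one part parsed to its clamped half-open interval (lo, hi); none = Python ValueError from int()
def pcrIntervalB? (total : Int) (part : String) : Option (Int × Int) :=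
  let q := PySem.Str.strip part
  if PySem.Str.isIn "-" q then
    match PySem.Str.splitMax? q "-" 1 with
    | some [s1, s2] =>
      match PySem.Int.ofStr? s1, PySem.Int.ofStr? s2 with
      | some v1, some v2 => some (max 1 v1 - 1, min total v2)
      | _, _ => none
    | _ => none
  else
    match PySem.Int.ofStr? q with
    | some v =>
      let lo := v - 1
      some (lo, if 0 ≤ lo ∧ lo < total then lo + 1 else lo)
    | none => none

-- stage 1: 'if lo < hi: intervals.append((lo, hi))' over the parts
def pcrCollectB (total : Int) (parts : List String) (acc : List (Int × Int)) :
    Option (List (Int × Int)) :=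
  match parts with
  | [] => some acc
  | p :: rest =>
    match pcrIntervalB? total p with
    | some (lo, hi) => pcrCollectB total rest (if lo < hi then acc ++ [(lo, hi)] else acc)
    | none => none

-- stage 2: 'out.extend(range(max(lo, cur), hi)); cur = max(cur, hi)' over the sorted intervals
def pcrEmit (ivs : List (Int × Int)) (cur : Int) : List Int :=
  match ivs with
  | [] => []
  | (lo, hi) :: rest => PySem.List.pyRange (max lo cur) hi ++ pcrEmit rest (max cur hi)

def parse_chapter_range_alt (spec : String) (total : Int) : List Int :=
  match pcrCollectB total ((PySem.Str.split? spec ",").getD []) [] with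
  | some ivs => pcrEmit (PySem.List.sorted ivs (fun iv => iv.1)) 0
  | none => []   -- Python raises ValueError here; excluded by Pre_

-- ===== PRECONDITION & SPEC =====
-- Pre_ excludes exactly the specs on which Python's int() raises ValueError in A (an empty or
-- non-numeric piece, e.g. '', 'x', or a lone '-3' whose split leaves an empty start); B raises identically there.
def pcrPartOk (part : String) : Bool :=
  let q := PySem.Str.strip part
  if PySem.Str.isIn "-" q then
    match PySem.Str.splitMax? q "-" 1 with
    | some [s1, s2] => (PySem.Int.ofStr? s1).isSome && (PySem.Int.ofStr? s2).isSome
    | _ => false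
  else (PySem.Int.ofStr? q).isSome

def Pre_parse_chapter_range (spec : String) (total : Int) : Prop :=
  ∀ part ∈ (PySem.Str.split? spec ",").getD [], pcrPartOk part = true
instance (spec : String) (total : Int) : Decidable (Pre_parse_chapter_range spec total) := by
  unfold Pre_parse_chapter_range; infer_instance

def pvWitness_parse_chapter_range : String × Int := ("1,3-4", 5)

def Spec_parse_chapter_range (spec : String) (total : Int) (out : List Int) : Prop := out = parse_chapter_range_alt spec total
instance (spec : String) (total : Int) (out : List Int) : Decidable (Spec_parse_chapter_range spec total out) := by unfold Spec_parse_chapter_range; infer_instance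

-- ===== CLAIM (what is proved, stated in full; the proofs are below) =====
def Claim_equal_parse_chapter_range : Prop := ∀ (spec : String) (total : Int), Dom_parse_chapter_range spec total → Pre_parse_chapter_range spec total → Spec_parse_chapter_range spec total (parse_chapter_range spec total)

-- ===== LEMMAS AND PROOFS =====

-- membership of the sweep's output: an index is emitted iff it is ≥ the cursor and covered by
-- some interval of the (start-sorted) list
lemma mem_pcrEmit (ivs : List (Int × Int)) (cur : Int)
    (hs : ivs.Pairwise (fun a b => a.1 ≤ b.1)) (x : Int) :
    x ∈ pcrEmit ivs cur ↔ cur ≤ x ∧ ∃ p ∈ ivs, p.1 ≤ x ∧ x < p.2 := by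
  induction ivs generalizing cur with
  | nil => simp [pcrEmit]
  | cons hd rest ih =>
    obtain ⟨lo, hi⟩ := hd
    rw [List.pairwise_cons] at hs
    simp only [pcrEmit, List.mem_append, PySem.List.mem_pyRange_one,
      ih (max cur hi) hs.2, List.mem_cons]
    constructor
    · rintro (h | ⟨hc, p, hp, hcov⟩)
      · exact ⟨by omega, (lo, hi), Or.inl rfl, by omega⟩
      · exact ⟨by omega, p, Or.inr hp, hcov⟩
    · rintro ⟨hc, p, hp | hp, h1, h2⟩
      · left; subst hp; simp at h1 h2 ⊢; omega
      · by_cases hx : x < hi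
        · left
          have := hs.1 p hp
          omega
        · right
          exact ⟨by omega, p, hp, h1, h2⟩

-- the sweep's output is strictly increasing
lemma pairwise_pcrEmit (ivs : List (Int × Int)) (cur : Int)
    (hs : ivs.Pairwise (fun a b => a.1 ≤ b.1)) :
    (pcrEmit ivs cur).Pairwise (· < ·) := by
  induction ivs generalizing cur with
  | nil => simp [pcrEmit]
  | cons hd rest ih =>
    obtain ⟨lo, hi⟩ := hd
    rw [List.pairwise_cons] at hs
    rw [pcrEmit, List.pairwise_append]
    refine ⟨PySem.List.pairwise_lt_pyRange_one _ _, ih (max cur hi) hs.2, ?_⟩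
    intro a ha b hb
    rw [PySem.List.mem_pyRange_one] at ha
    have hbm := (mem_pcrEmit rest (max cur hi) hs.2 b).1 hb
    omega

-- loop invariant: both stages succeed together; A's set membership = coverage by B's intervals
def pcrCover (ivs : List (Int × Int)) (x : Int) : Prop := ∃ p ∈ ivs, p.1 ≤ x ∧ x < p.2

lemma pcrLoop (total : Int) (parts : List String) (s : PySem.Set Int) (acc : List (Int × Int))
    (hok : ∀ p ∈ parts, pcrPartOk p = true)
    (hnd : s.Nodup)
    (hacc : ∀ q ∈ acc, 0 ≤ q.1 ∧ q.1 < q.2)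
    (hrel : ∀ x, x ∈ s ↔ pcrCover acc x) :
    ∃ s' ivs, pcrLoopA total parts s = some s' ∧ pcrCollectB total parts acc = some ivs ∧
      s'.Nodup ∧ (∀ q ∈ ivs, 0 ≤ q.1 ∧ q.1 < q.2) ∧ (∀ x, x ∈ s' ↔ pcrCover ivs x) := by
  induction parts generalizing s acc with
  | nil => exact ⟨s, acc, rfl, rfl, hnd, hacc, hrel⟩
  | cons p rest ih =>
    have hokp := hok p (by simp)
    unfold pcrPartOk at hokp
    unfold pcrLoopA pcrCollectB pcrPartA pcrIntervalB?
    generalize PySem.Str.strip p = q at hokp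
    by_cases hin : PySem.Str.isIn "-" q
    · simp only [hin, if_true] at hokp ⊢
      rcases hsp : PySem.Str.splitMax? q "-" 1 with _ | l <;> rw [hsp] at hokp
      · exact absurd hokp (by simp)
      · match l with
        | [] => exact absurd hokp (by simp)
        | [_] => exact absurd hokp (by simp)
        | _ :: _ :: _ :: _ => exact absurd hokp (by simp)
        | [s1, s2] =>
          simp only [Bool.and_eq_true, Option.isSome_iff_exists] at hokp
          obtain ⟨⟨v1, h1⟩, ⟨v2, h2⟩⟩ := hokp
          simp only [h1, h2]
          set lo := max 1 v1 - 1 with hlo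
          set hi := min total v2 with hhi
          by_cases hlh : lo < hi
          · rw [if_pos hlh]
            apply ih _ _ (fun x hx => hok x (by simp [hx]))
              (PySem.Set.nodup_update s _ hnd)
            · intro qq hq
              rcases List.mem_append.1 hq with h | h
              · exact hacc qq h
              · simp at h; subst h; constructor <;> omega
            · intro x
              rw [PySem.Set.mem_update, hrel x]
              unfold pcrCover
              constructor
              · rintro (⟨pp, hp, hc⟩ | h)
                · exact ⟨pp, by simp [hp], hc⟩
                · rw [PySem.List.mem_pyRange_one] at h
                  exact ⟨(lo, hi), by simp, by simpa using h⟩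
              · rintro ⟨pp, hp, hc⟩
                rcases List.mem_append.1 hp with h | h
                · exact Or.inl ⟨pp, h, hc⟩
                · simp at h; subst h
                  exact Or.inr (PySem.List.mem_pyRange_one.2 (by simpa using hc))
          · rw [if_neg hlh]
            apply ih _ _ (fun x hx => hok x (by simp [hx]))
              (PySem.Set.nodup_update s _ hnd) hacc
            intro x
            rw [PySem.Set.mem_update, hrel x]
            constructor
            · rintro (h | h)
              · exact h
              · rw [PySem.List.mem_pyRange_one] at h; omega
            · exact Or.inl
    · simp only [hin, if_false, Bool.false_eq_true, Option.isSome_iff_exists] at hokp ⊢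
      obtain ⟨v, h1⟩ := hokp
      simp only [h1]
      by_cases hc : 0 ≤ v - 1 ∧ v - 1 < total
      · rw [if_pos hc, if_pos hc, if_pos (by omega : v - 1 < v - 1 + 1)]
        apply ih _ _ (fun x hx => hok x (by simp [hx])) (PySem.Set.nodup_add s _ hnd)
        · intro qq hq
          rcases List.mem_append.1 hq with h | h
          · exact hacc qq h
          · simp at h; subst h; constructor <;> omega
        · intro x
          rw [PySem.Set.mem_add, hrel x]
          unfold pcrCover
          constructor
          · rintro (⟨pp, hp, hcv⟩ | h)
            · exact ⟨pp, by simp [hp], hcv⟩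
            · exact ⟨(v - 1, v - 1 + 1), by simp, by omega⟩
          · rintro ⟨pp, hp, hcv⟩
            rcases List.mem_append.1 hp with h | h
            · exact Or.inl ⟨pp, h, hcv⟩
            · simp at h; subst h; right; omega
      · rw [if_neg hc, if_neg hc, if_neg (by omega : ¬ (v - 1 < v - 1))]
        exact ih _ _ (fun x hx => hok x (by simp [hx])) hnd hacc hrel

-- ===== VERDICT (by name: the statement is the Claim_ definition above) =====
theorem parse_chapter_range_spec : Claim_equal_parse_chapter_range := by
  intro spec total _ hpre
  unfold Spec_parse_chapter_range parse_chapter_range parse_chapter_range_alt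
  obtain ⟨s', ivs, hA, hB, hnd, hiv, hrel⟩ :=
    pcrLoop total ((PySem.Str.split? spec ",").getD []) PySem.Set.empty [] hpre
      (by simp [PySem.Set.empty]) (by simp) (by simp [PySem.Set.empty, pcrCover])
  rw [hA, hB]
  have hsorted : (PySem.List.sorted ivs (fun iv => iv.1) false).Pairwise (fun a b => a.1 ≤ b.1) :=
    PySem.List.sorted_pairwise ivs (fun iv => iv.1)
  have hmemiv : ∀ q, q ∈ PySem.List.sorted ivs (fun iv => iv.1) false ↔ q ∈ ivs := by
    intro q; exact PySem.List.mem_sorted ivs (fun iv => iv.1) false q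
  have hmem : ∀ x, x ∈ pcrEmit (PySem.List.sorted ivs (fun iv => iv.1) false) 0 ↔ x ∈ s' := by
    intro x
    rw [mem_pcrEmit _ _ hsorted, hrel x]
    unfold pcrCover
    constructor
    · rintro ⟨_, p, hp, hc⟩; exact ⟨p, (hmemiv p).1 hp, hc⟩
    · rintro ⟨p, hp, hc⟩
      have := hiv p hp
      exact ⟨by omega, p, (hmemiv p).2 hp, hc⟩
  have hpw := pairwise_pcrEmit (PySem.List.sorted ivs (fun iv => iv.1) false) 0 hsorted
  apply PySem.List.sorted_eq_of_perm_of_pairwise_lt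
  · exact (List.perm_ext_iff_of_nodup (List.Pairwise.imp (fun h => ne_of_lt h) hpw) hnd).mpr hmem
  · exact hpw
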